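-- pv_equiv track=rewrite | github.com/posl/comment_recommendation | script/split_gen/5_time/zh/264_D/6.py | get_min_swap_times
-- ===== SOURCE A (Python) =====
-- def get_min_swap_times(s):
--     target = "atcoder"
--     s_len = len(s)
--     target_len = len(target)
--     dp = [[0 for _ in range(s_len + 1)] for _ in range(target_len + 1)]
--     for i in range(1, target_len + 1):
--         dp[i][0] = dp[i - 1][0] + i
--     for j in range(1, s_len + 1):
--         dp[0][j] = dp[0][j - 1] + 1
--     for i in range(1, target_len + 1):
--         for j in range(1, s_len + 1):
--             if target[i - 1] == s[j - 1]:
--                 dp[i][j] = dp[i - 1][j - 1]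
--             else:
--                 dp[i][j] = min(dp[i][j - 1] + 1, dp[i - 1][j] + i)
--     return dp[target_len][s_len]
-- ===== SOURCE B (Python) =====
-- def get_min_swap_times(s):
--     # Enumerate the 128 subsets of target positions that could be kept:
--     # each subset is feasible iff its induced pattern is a (greedy) subsequence
--     # of s; its cost is (sum of 1-based weights of skipped target positions)
--     # + (number of unmatched characters of s).  Return the cheapest feasible one.
--     target = "atcoder"
--     n = len(s)
--     best = n + 28  # mask 0: skip every target position, delete all of s
--     for mask in range(1, 128):
--         idx = [i for i in range(7) if mask >> i & 1]
--         pat = [target[i] for i in idx]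
--         k = 0
--         for ch in s:
--             if k < len(pat) and pat[k] == ch:
--                 k += 1
--         if k == len(pat):
--             skip = 28 - sum(i + 1 for i in idx)
--             cand = skip + n - len(pat)
--             if cand < best:
--                 best = cand
--     return best
-- ===== Notes on version B (the rewrite author's own statement) =====
-- stated objective: alternative
-- what changed: Replaces the dynamic-programming table over (target prefix, s prefix) by direct enumeration of all 128 subsets of kept target positions, testing each induced pattern as a greedy subsequence of s and taking the cheapest feasible subset (skip weights + unmatched characters).
import Mathlib
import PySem

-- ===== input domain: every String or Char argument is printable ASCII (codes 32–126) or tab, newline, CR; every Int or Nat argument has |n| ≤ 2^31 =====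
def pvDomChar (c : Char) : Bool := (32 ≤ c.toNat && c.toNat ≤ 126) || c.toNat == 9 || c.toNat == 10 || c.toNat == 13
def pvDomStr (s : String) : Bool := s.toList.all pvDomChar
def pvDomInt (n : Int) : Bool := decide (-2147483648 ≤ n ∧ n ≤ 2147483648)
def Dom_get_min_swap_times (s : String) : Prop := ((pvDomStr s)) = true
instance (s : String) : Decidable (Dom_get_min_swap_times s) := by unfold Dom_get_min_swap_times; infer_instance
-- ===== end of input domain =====

-- B abandons A's DP table entirely: it enumerates the 128 subsets of kept target
-- positions, keeps those whose induced pattern is a greedy subsequence of s, and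
-- returns the cheapest (skip weights + unmatched characters) — an alternative algorithm.

-- ===== PORT A =====
-- shared literal: target = "atcoder" as a char list
def pvTgt : List Char := "atcoder".toList

-- dp[i][j] read / write on the list-of-lists table (indices always in range in A)
def pvGet2 (m : List (List Int)) (i j : Nat) : Int := (m.getD i []).getD j 0
def pvSet2 (m : List (List Int)) (i j : Nat) (v : Int) : List (List Int) :=
  m.set i ((m.getD i []).set j v)

def get_min_swap_times (s : String) : Int :=
  let sl := s.toList
  let s_len := sl.length
  let target_len := pvTgt.length
  let dp0 : List (List Int) :=
    List.replicate (target_len + 1) (List.replicate (s_len + 1) (0 : Int))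
  -- for i in range(1, target_len+1): dp[i][0] = dp[i-1][0] + i
  let dp1 := (List.range target_len).foldl (fun dp i =>
      pvSet2 dp (i+1) 0 (pvGet2 dp i 0 + ((i : Int) + 1))) dp0
  -- for j in range(1, s_len+1): dp[0][j] = dp[0][j-1] + 1
  let dp2 := (List.range s_len).foldl (fun dp j =>
      pvSet2 dp 0 (j+1) (pvGet2 dp 0 j + 1)) dp1
  -- nested fill loop
  let dp3 := (List.range target_len).foldl (fun dp i =>
      (List.range s_len).foldl (fun dp j =>
          if pvTgt.getD i ' ' == sl.getD j ' ' then
            pvSet2 dp (i+1) (j+1) (pvGet2 dp i j)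
          else
            pvSet2 dp (i+1) (j+1)
              (min (pvGet2 dp (i+1) j + 1) (pvGet2 dp i (j+1) + ((i : Int) + 1)))
        ) dp) dp2
  pvGet2 dp3 target_len s_len

-- ===== PORT B =====
-- idx = [i for i in range(7) if mask >> i & 1]   (int shift/and ported by hand, exact on Nat)
def pvIdx (mask : Nat) : List Nat :=
  (List.range 7).filter (fun i => (mask >>> i) % 2 == 1)

-- the greedy-subsequence scan: k = 0; for ch in s: if k < len(pat) and pat[k] == ch: k += 1
def pvGreedyK (pat sl : List Char) : Nat :=
  sl.foldl (fun k ch => if k < pat.length ∧ pat.getD k ' ' == ch then k + 1 else k) 0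

def get_min_swap_times_alt (s : String) : Int :=
  let sl := s.toList
  let n : Int := sl.length
  (List.range' 1 127).foldl (fun best mask =>
    let idx := pvIdx mask
    let pat := idx.map (fun i => pvTgt.getD i ' ')
    if pvGreedyK pat sl == pat.length then
      let skip : Int := 28 - (idx.map (fun i => (i : Int) + 1)).sum
      let cand := skip + n - pat.length
      if cand < best then cand else best
    else best) (n + 28)

-- ===== PRECONDITION & SPEC =====
def Spec_get_min_swap_times (s : String) (out : Int) : Prop := out = get_min_swap_times_alt s
instance (s : String) (out : Int) : Decidable (Spec_get_min_swap_times s out) := by unfold Spec_get_min_swap_times; infer_instance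

-- ===== CLAIM (what is proved, stated in full; the proofs are below) =====
def Claim_equal_get_min_swap_times : Prop := ∀ (s : String), Dom_get_min_swap_times s → Spec_get_min_swap_times s (get_min_swap_times s)

-- ===== LEMMAS AND PROOFS =====

-- the mathematical dp value: cost sl i j = dp[i][j] of A (edit cost of matching
-- the first i chars of "atcoder" against the first j chars of sl)
def cost (sl : List Char) : Nat → Nat → Int
  | 0, j => (j : Int)
  | i+1, 0 => cost sl i 0 + ((i : Int) + 1)
  | i+1, j+1 =>
      if pvTgt.getD i ' ' == sl.getD j ' ' then cost sl i j
      else min (cost sl (i+1) j + 1) (cost sl i (j+1) + ((i : Int) + 1))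
  termination_by i j => (i, j)

-- ---------- table helper lemmas ----------

theorem length_pvSet2 (m : List (List Int)) (i j : Nat) (v : Int) :
    (pvSet2 m i j v).length = m.length := by
  simp [pvSet2]

theorem rowlen_pvSet2 (m : List (List Int)) (i j : Nat) (v : Int) (i' : Nat) :
    ((pvSet2 m i j v).getD i' []).length = ((m.getD i' []).length) := by
  unfold pvSet2
  rw [List.getD_eq_getElem?_getD, List.getElem?_set]
  by_cases hii : i = i'
  · subst hii
    by_cases hi : i < m.length
    · simp [hi]
    · simp [hi, List.getD_eq_getElem?_getD]
  · simp [hii, List.getD_eq_getElem?_getD]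

theorem get2_pvSet2 (m : List (List Int)) (i j : Nat) (v : Int) (i' j' : Nat)
    (hi : i < m.length) (hj : j < (m.getD i []).length) :
    pvGet2 (pvSet2 m i j v) i' j' =
      if i' = i ∧ j' = j then v else pvGet2 m i' j' := by
  simp only [pvGet2, pvSet2, List.getD_eq_getElem?_getD] at hj ⊢
  rw [List.getElem?_set]
  by_cases hii : i = i'
  · subst hii
    rw [if_pos rfl, if_pos hi]
    simp only [Option.getD_some]
    rw [List.getElem?_set]
    by_cases hjj : j = j'
    · subst hjj
      rw [if_pos rfl, if_pos hj]
      simp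
    · rw [if_neg hjj, if_neg (by tauto)]
  · rw [if_neg hii, if_neg (by tauto)]

-- shape of A's table
def Sh (sl : List Char) (m : List (List Int)) : Prop :=
  m.length = 8 ∧ ∀ i, i < 8 → (m.getD i []).length = sl.length + 1

theorem Sh_pvSet2 {sl : List Char} {m : List (List Int)} (h : Sh sl m) (i j : Nat) (v : Int) :
    Sh sl (pvSet2 m i j v) := by
  refine ⟨by rw [length_pvSet2, h.1], fun i' hi' => by rw [rowlen_pvSet2]; exact h.2 i' hi'⟩

theorem get2_pvSet2_sh {sl : List Char} {m : List (List Int)} (h : Sh sl m)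
    {i j : Nat} (v : Int) (hi : i < 8) (hj : j ≤ sl.length) (i' j' : Nat) :
    pvGet2 (pvSet2 m i j v) i' j' =
      if i' = i ∧ j' = j then v else pvGet2 m i' j' := by
  exact get2_pvSet2 m i j v i' j' (by rw [h.1]; exact hi) (by rw [h.2 i hi]; omega)

-- ---------- A side: stage-by-stage characterisation ----------

def stepA1 : List (List Int) → Nat → List (List Int) :=
  fun dp i => pvSet2 dp (i+1) 0 (pvGet2 dp i 0 + ((i : Int) + 1))

def stepA2 : List (List Int) → Nat → List (List Int) :=
  fun dp j => pvSet2 dp 0 (j+1) (pvGet2 dp 0 j + 1)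

def stepA3in (sl : List Char) (i : Nat) : List (List Int) → Nat → List (List Int) :=
  fun dp j =>
    if pvTgt.getD i ' ' == sl.getD j ' ' then
      pvSet2 dp (i+1) (j+1) (pvGet2 dp i j)
    else
      pvSet2 dp (i+1) (j+1)
        (min (pvGet2 dp (i+1) j + 1) (pvGet2 dp i (j+1) + ((i : Int) + 1)))

def dpA0 (sl : List Char) : List (List Int) :=
  List.replicate 8 (List.replicate (sl.length + 1) (0 : Int))

def dpA1 (sl : List Char) : List (List Int) := (List.range 7).foldl stepA1 (dpA0 sl)

def dpA2 (sl : List Char) : List (List Int) :=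
  (List.range sl.length).foldl stepA2 (dpA1 sl)

def dpA3 (sl : List Char) : List (List Int) :=
  (List.range 7).foldl (fun dp i => (List.range sl.length).foldl (stepA3in sl i) dp) (dpA2 sl)

theorem a_unfold (s : String) :
    get_min_swap_times s = pvGet2 (dpA3 s.toList) 7 s.toList.length := by
  rfl

theorem dpA0_sh (sl : List Char) : Sh sl (dpA0 sl) := by
  constructor
  · simp [dpA0]
  · intro i hi
    rw [dpA0, List.getD_eq_getElem?_getD, List.getElem?_replicate, if_pos hi]
    simp

theorem get2_dpA0 (sl : List Char) (i j : Nat) : pvGet2 (dpA0 sl) i j = 0 := by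
  simp only [pvGet2, dpA0, List.getD_eq_getElem?_getD]
  rw [List.getElem?_replicate]
  by_cases hi : i < 8
  · rw [if_pos hi]
    simp only [Option.getD_some]
    rw [List.getElem?_replicate]
    by_cases hjl : j < sl.length + 1
    · rw [if_pos hjl]; rfl
    · rw [if_neg hjl]; rfl
  · rw [if_neg hi]; rfl

-- invariant after k iterations of A's first loop
def Q1 (sl : List Char) (k : Nat) (dp : List (List Int)) : Prop :=
  Sh sl dp ∧ ∀ i j, pvGet2 dp i j =
    if j = 0 ∧ i ≤ k then cost sl i 0 else 0

theorem dp1_partial (sl : List Char) : ∀ k, k ≤ 7 →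
    Q1 sl k ((List.range k).foldl stepA1 (dpA0 sl)) := by
  intro k
  induction k with
  | zero =>
    intro _
    refine ⟨by simpa using dpA0_sh sl, fun i j => ?_⟩
    rw [List.range_zero, List.foldl_nil, get2_dpA0]
    split_ifs with h
    · obtain ⟨hj, hi⟩ := h
      interval_cases i
      simp [cost]
    · rfl
  | succ k ih =>
    intro hk
    have ih := ih (by omega)
    rw [List.range_succ, List.foldl_append, List.foldl_cons, List.foldl_nil]
    set dp := (List.range k).foldl stepA1 (dpA0 sl) with hdp
    have hr : pvGet2 dp k 0 = cost sl k 0 := by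
      rw [ih.2 k 0, if_pos ⟨rfl, le_refl k⟩]
    refine ⟨Sh_pvSet2 ih.1 _ _ _, fun i j => ?_⟩
    rw [stepA1, get2_pvSet2_sh ih.1 _ (by omega) (by omega), hr, ih.2 i j]
    by_cases h : i = k + 1 ∧ j = 0
    · obtain ⟨hi, hj⟩ := h; subst hi; subst hj
      simp [cost]
    · rw [if_neg h]
      split_ifs <;> first | rfl | omega

-- invariant after k iterations of A's second loop
def Q2 (sl : List Char) (k : Nat) (dp : List (List Int)) : Prop :=
  Sh sl dp ∧ ∀ i j, pvGet2 dp i j =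
    if i = 0 ∧ j ≤ k then (j : Int)
    else if j = 0 ∧ i ≤ 7 then cost sl i 0 else 0

theorem dp2_partial (sl : List Char) : ∀ k, k ≤ sl.length →
    Q2 sl k ((List.range k).foldl stepA2 (dpA1 sl)) := by
  intro k
  induction k with
  | zero =>
    intro _
    obtain ⟨hsh, hval⟩ := dp1_partial sl 7 (le_refl 7)
    rw [show (List.range 7).foldl stepA1 (dpA0 sl) = dpA1 sl from rfl] at hsh hval
    rw [List.range_zero, List.foldl_nil]
    refine ⟨hsh, fun i j => ?_⟩
    rw [hval i j]
    by_cases hB : i = 0 ∧ j = 0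
    · obtain ⟨hi0, hj0⟩ := hB; subst hi0; subst hj0
      simp [cost]
    · rw [if_neg (by omega : ¬(i = 0 ∧ j ≤ 0))]
  | succ k ih =>
    intro hk
    have ih := ih (by omega)
    rw [List.range_succ, List.foldl_append, List.foldl_cons, List.foldl_nil]
    set dp := (List.range k).foldl stepA2 (dpA1 sl) with hdp
    have hr : pvGet2 dp 0 k = (k : Int) := by
      rw [ih.2 0 k, if_pos ⟨rfl, le_refl k⟩]
    refine ⟨Sh_pvSet2 ih.1 _ _ _, fun i j => ?_⟩
    rw [stepA2, get2_pvSet2_sh ih.1 _ (by omega) (by omega), hr, ih.2 i j]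
    by_cases h : i = 0 ∧ j = k + 1
    · obtain ⟨hi, hj⟩ := h; subst hi; subst hj
      rw [if_pos ⟨rfl, rfl⟩, if_pos ⟨rfl, le_refl _⟩]
      push_cast; ring
    · rw [if_neg h]
      split_ifs <;> first | rfl | omega

-- invariant after the first k rows of A's nested loop are fully processed
def QG (sl : List Char) (k : Nat) (dp : List (List Int)) : Prop :=
  Sh sl dp ∧ ∀ i j, pvGet2 dp i j =
    if i ≤ k ∧ j ≤ sl.length then cost sl i j
    else if j = 0 ∧ i ≤ 7 then cost sl i 0 else 0

-- invariant inside row k+1: the first t cells of that row are filled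
def QH (sl : List Char) (k t : Nat) (dp : List (List Int)) : Prop :=
  Sh sl dp ∧ ∀ i j, pvGet2 dp i j =
    if i ≤ k ∧ j ≤ sl.length then cost sl i j
    else if i = k + 1 ∧ 1 ≤ j ∧ j ≤ t then cost sl i j
    else if j = 0 ∧ i ≤ 7 then cost sl i 0 else 0

theorem cost_zero (sl : List Char) (j : Nat) : cost sl 0 j = (j : Int) := by
  cases j <;> simp [cost]

theorem dp3_inner (sl : List Char) (k : Nat) (hk : k ≤ 6) (dp : List (List Int))
    (h : QG sl k dp) : ∀ t, t ≤ sl.length →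
    QH sl k t ((List.range t).foldl (stepA3in sl k) dp) := by
  intro t
  induction t with
  | zero =>
    intro _
    refine ⟨h.1, fun i j => ?_⟩
    rw [List.range_zero, List.foldl_nil, h.2 i j]
    split_ifs <;> first | rfl | omega
  | succ t ih =>
    intro ht
    have ih := ih (by omega)
    rw [List.range_succ, List.foldl_append, List.foldl_cons, List.foldl_nil]
    set dpt := (List.range t).foldl (stepA3in sl k) dp with hdpt
    have hr1 : pvGet2 dpt k t = cost sl k t := by
      rw [ih.2 k t, if_pos ⟨le_refl k, by omega⟩]
    have hr2 : pvGet2 dpt (k+1) t = cost sl (k+1) t := by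
      rw [ih.2 (k+1) t]
      by_cases h0 : t = 0
      · subst h0
        rw [if_neg (by omega), if_neg (by omega), if_pos ⟨rfl, by omega⟩]
      · rw [if_neg (by omega), if_pos ⟨rfl, by omega, le_refl t⟩]
    have hr3 : pvGet2 dpt k (t+1) = cost sl k (t+1) := by
      rw [ih.2 k (t+1), if_pos ⟨le_refl k, by omega⟩]
    have key : ∀ i j, pvGet2 (pvSet2 dpt (k+1) (t+1) (cost sl (k+1) (t+1))) i j =
        if i ≤ k ∧ j ≤ sl.length then cost sl i j
        else if i = k + 1 ∧ 1 ≤ j ∧ j ≤ t + 1 then cost sl i j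
        else if j = 0 ∧ i ≤ 7 then cost sl i 0 else 0 := by
      intro i j
      rw [get2_pvSet2_sh ih.1 _ (by omega) (by omega), ih.2 i j]
      by_cases hij : i = k + 1 ∧ j = t + 1
      · obtain ⟨hi, hj⟩ := hij; subst hi; subst hj
        rw [if_pos ⟨rfl, rfl⟩, if_neg (by omega), if_pos ⟨rfl, by omega, le_refl _⟩]
      · rw [if_neg hij]
        split_ifs <;> first | rfl | omega
    unfold stepA3in
    by_cases hc : pvTgt.getD k ' ' == sl.getD t ' '
    · rw [if_pos hc, hr1]
      have : cost sl k t = cost sl (k+1) (t+1) := by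
        rw [show cost sl (k+1) (t+1) = if pvTgt.getD k ' ' == sl.getD t ' ' then cost sl k t
              else min (cost sl (k+1) t + 1) (cost sl k (t+1) + ((k : Int) + 1)) from by
          simp [cost], if_pos hc]
      rw [this]
      exact ⟨Sh_pvSet2 ih.1 _ _ _, key⟩
    · rw [if_neg hc, hr2, hr3]
      have : min (cost sl (k+1) t + 1) (cost sl k (t+1) + ((k : Int) + 1))
          = cost sl (k+1) (t+1) := by
        rw [show cost sl (k+1) (t+1) = if pvTgt.getD k ' ' == sl.getD t ' ' then cost sl k t
              else min (cost sl (k+1) t + 1) (cost sl k (t+1) + ((k : Int) + 1)) from by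
          simp [cost], if_neg hc]
      rw [this]
      exact ⟨Sh_pvSet2 ih.1 _ _ _, key⟩

theorem dp3_partial (sl : List Char) : ∀ k, k ≤ 7 →
    QG sl k ((List.range k).foldl (fun dp i => (List.range sl.length).foldl (stepA3in sl i) dp) (dpA2 sl)) := by
  intro k
  induction k with
  | zero =>
    intro _
    obtain ⟨hsh, hval⟩ := dp2_partial sl sl.length (le_refl _)
    rw [show (List.range sl.length).foldl stepA2 (dpA1 sl) = dpA2 sl from rfl] at hsh hval
    rw [List.range_zero, List.foldl_nil]
    refine ⟨hsh, fun i j => ?_⟩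
    rw [hval i j]
    by_cases hB : i = 0 ∧ j ≤ sl.length
    · obtain ⟨hi0, hj⟩ := hB; subst hi0
      rw [if_pos ⟨rfl, hj⟩, if_pos ⟨le_refl 0, hj⟩, cost_zero]
    · rw [if_neg hB, if_neg (show ¬(i ≤ 0 ∧ j ≤ sl.length) by omega)]
  | succ k ih =>
    intro hk
    have ih := ih (by omega)
    rw [List.range_succ, List.foldl_append, List.foldl_cons, List.foldl_nil]
    obtain ⟨hsh, hval⟩ := dp3_inner sl k (by omega) _ ih sl.length (le_refl _)
    refine ⟨hsh, fun i j => ?_⟩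
    rw [hval i j]
    by_cases h1 : i ≤ k ∧ j ≤ sl.length
    · rw [if_pos h1, if_pos (by omega : i ≤ k + 1 ∧ j ≤ sl.length)]
    · rw [if_neg h1]
      by_cases h2 : i = k + 1 ∧ 1 ≤ j ∧ j ≤ sl.length
      · rw [if_pos h2, if_pos (by omega : i ≤ k + 1 ∧ j ≤ sl.length)]
      · rw [if_neg h2]
        by_cases h3 : i ≤ k + 1 ∧ j ≤ sl.length
        · have hi : i = k + 1 := by omega
          have hj0 : j = 0 := by omega
          subst hi; subst hj0
          rw [if_pos ⟨rfl, by omega⟩, if_pos h3]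
        · rw [if_neg h3]

theorem a_eq_cost (s : String) :
    get_min_swap_times s = cost s.toList 7 s.toList.length := by
  rw [a_unfold]
  obtain ⟨_, hval⟩ := dp3_partial s.toList 7 (le_refl 7)
  rw [show dpA3 s.toList = (List.range 7).foldl (fun dp i => (List.range s.toList.length).foldl (stepA3in s.toList i) dp) (dpA2 s.toList) from rfl] at *
  rw [hval 7 s.toList.length, if_pos ⟨le_refl 7, le_refl _⟩]

-- ---------- B side: cost = min over kept-position subsets ----------

-- triangular weight: cost of skipping all of the first i target positions
def Ti : Nat → Int
  | 0 => 0
  | i + 1 => Ti i + ((i : Int) + 1)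

-- total skip weight of a kept set M
def sumw (M : List Nat) : Int := (M.map (fun i => (i : Int) + 1)).sum

-- the value B assigns to kept set M against a string of length j
def valM (M : List Nat) (i j : Nat) : Int := Ti i - sumw M + (j : Int) - M.length

theorem cost_col0 (sl : List Char) (i : Nat) : cost sl i 0 = Ti i := by
  induction i with
  | zero => simp [cost, Ti]
  | succ i ih => simp [cost, Ti, ih]

theorem cost_succ_succ (sl : List Char) (i j : Nat) :
    cost sl (i+1) (j+1) =
      if pvTgt.getD i ' ' == sl.getD j ' ' then cost sl i j
      else min (cost sl (i+1) j + 1) (cost sl i (j+1) + ((i : Int) + 1)) := by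
  simp [cost]

-- monotonicity lemmas (mutual ladders over the target index)
theorem L6_of_L3 (sl : List Char) (i : Nat)
    (h3 : ∀ j, cost sl i (j+1) ≤ cost sl i j + 1) :
    ∀ j, cost sl i j ≤ cost sl (i+1) j + 1 := by
  intro j
  induction j with
  | zero =>
    have h : cost sl (i+1) 0 = cost sl i 0 + ((i : Int) + 1) := by simp [cost]
    have hi : (0 : Int) ≤ (i : Int) := Int.natCast_nonneg i
    omega
  | succ j ihj =>
    rw [cost_succ_succ]
    by_cases hc : (pvTgt.getD i ' ' == sl.getD j ' ') = true
    · rw [if_pos hc]; exact h3 j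
    · rw [if_neg hc]
      have h1 := h3 j
      have hi : (0 : Int) ≤ (i : Int) := Int.natCast_nonneg i
      rcases min_choice (cost sl (i+1) j + 1) (cost sl i (j+1) + ((i : Int) + 1)) with h | h <;>
        rw [h] <;> omega

theorem cost_mono_pair (sl : List Char) : ∀ i : Nat,
    (∀ j, cost sl i (j+1) ≤ cost sl i j + 1) ∧ (∀ j, cost sl i j ≤ cost sl (i+1) j + 1) := by
  intro i
  induction i with
  | zero =>
    have h3 : ∀ j, cost sl 0 (j+1) ≤ cost sl 0 j + 1 := by
      intro j; rw [cost_zero, cost_zero]; push_cast; omega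
    exact ⟨h3, L6_of_L3 sl 0 h3⟩
  | succ i ih =>
    have h3 : ∀ j, cost sl (i+1) (j+1) ≤ cost sl (i+1) j + 1 := by
      intro j
      rw [cost_succ_succ]
      by_cases hc : (pvTgt.getD i ' ' == sl.getD j ' ') = true
      · rw [if_pos hc]; exact ih.2 j
      · rw [if_neg hc]; exact min_le_left _ _
    exact ⟨h3, L6_of_L3 sl (i+1) h3⟩

theorem cost_mono_j (sl : List Char) (i j : Nat) : cost sl i (j+1) ≤ cost sl i j + 1 :=
  (cost_mono_pair sl i).1 j

theorem L2_of_L5 (sl : List Char) (i : Nat)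
    (h5 : ∀ j, cost sl i j ≤ cost sl i (j+1) + (i : Int)) :
    ∀ j, cost sl (i+1) j ≤ cost sl i j + ((i : Int) + 1) := by
  intro j
  cases j with
  | zero =>
    have h : cost sl (i+1) 0 = cost sl i 0 + ((i : Int) + 1) := by simp [cost]
    omega
  | succ j =>
    rw [cost_succ_succ]
    by_cases hc : (pvTgt.getD i ' ' == sl.getD j ' ') = true
    · rw [if_pos hc]
      have := h5 j
      omega
    · rw [if_neg hc]; exact min_le_right _ _

theorem cost_drop_pair (sl : List Char) : ∀ i : Nat,
    (∀ j, cost sl i j ≤ cost sl i (j+1) + (i : Int)) ∧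
    (∀ j, cost sl (i+1) j ≤ cost sl i j + ((i : Int) + 1)) := by
  intro i
  induction i with
  | zero =>
    have h5 : ∀ j, cost sl 0 j ≤ cost sl 0 (j+1) + ((0 : Nat) : Int) := by
      intro j; rw [cost_zero, cost_zero]; push_cast; omega
    exact ⟨h5, L2_of_L5 sl 0 h5⟩
  | succ i ih =>
    have h5 : ∀ j, cost sl (i+1) j ≤ cost sl (i+1) (j+1) + ((i+1 : Nat) : Int) := by
      intro j
      rw [cost_succ_succ]
      by_cases hc : (pvTgt.getD i ' ' == sl.getD j ' ') = true
      · rw [if_pos hc]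
        have := ih.2 j
        push_cast
        omega
      · rw [if_neg hc]
        have h1 := ih.1 j
        have h2 := ih.2 j
        rcases min_choice (cost sl (i+1) j + 1) (cost sl i (j+1) + ((i : Int) + 1)) with h | h <;>
          rw [h] <;> push_cast <;> omega
    exact ⟨h5, L2_of_L5 sl (i+1) h5⟩

theorem cost_drop_i (sl : List Char) (i j : Nat) :
    cost sl (i+1) j ≤ cost sl i j + ((i : Int) + 1) :=
  (cost_drop_pair sl i).2 j

-- decomposing a sublist of l ++ [a]
theorem sublist_concat_cases {α : Type} {M l : List α} {a : α}
    (h : M.Sublist (l ++ [a])) :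
    M.Sublist l ∨ ∃ M', M = M' ++ [a] ∧ M'.Sublist l := by
  rcases List.sublist_append_iff.mp h with ⟨l₁, l₂, rfl, h₁, h₂⟩
  rcases List.sublist_cons_iff.mp h₂ with h₂' | ⟨r, rfl, hr⟩
  · left; rw [List.sublist_nil.mp h₂', List.append_nil]; exact h₁
  · right; rw [List.sublist_nil.mp hr]; exact ⟨l₁, rfl, h₁⟩

theorem getD_eq_getElem_of_lt (sl : List Char) (j : Nat) (h : j < sl.length) :
    sl.getD j ' ' = sl[j] := by
  rw [List.getD_eq_getElem?_getD, List.getElem?_eq_getElem h]; rfl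

theorem take_succ_of_lt (sl : List Char) (j : Nat) (h : j < sl.length) :
    sl.take (j+1) = sl.take j ++ [sl.getD j ' '] := by
  rw [List.take_add_one, List.getElem?_eq_getElem h, getD_eq_getElem_of_lt sl j h]
  rfl

-- upper bound: cost is at most the value of any feasible kept set
theorem cost_le_valM (sl : List Char) : ∀ i : Nat, ∀ j, j ≤ sl.length → ∀ M : List Nat,
    M.Sublist (List.range i) →
    (M.map (fun k => pvTgt.getD k ' ')).Sublist (sl.take j) →
    cost sl i j ≤ valM M i j := by
  intro i
  induction i with
  | zero =>
    intro j _ M hM _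
    rw [List.range_zero, List.sublist_nil] at hM
    subst hM
    rw [cost_zero]
    simp [valM, sumw, Ti]
  | succ i ihi =>
    intro j
    induction j with
    | zero =>
      intro _ M _ hsub
      rw [List.take_zero, List.sublist_nil, List.map_eq_nil_iff] at hsub
      subst hsub
      rw [cost_col0]
      simp [valM, sumw]
    | succ j ihj =>
      intro hj M hM hsub
      have hjl : j < sl.length := by omega
      rw [List.range_succ] at hM
      rcases sublist_concat_cases hM with hM' | ⟨M', rfl, hM'⟩
      · -- i is not kept: step down in i
        have h1 := cost_drop_i sl i (j+1)
        have h2 := ihi (j+1) hj M hM' hsub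
        have hv : valM M (i+1) (j+1) = valM M i (j+1) + ((i : Int) + 1) := by
          simp [valM, Ti]; ring
        omega
      · -- M = M' ++ [i]
        rw [List.map_append] at hsub
        simp only [List.map_cons, List.map_nil] at hsub
        rw [take_succ_of_lt sl j hjl] at hsub
        rcases sublist_concat_cases hsub with hw | ⟨X, hx, hX⟩
        · -- whole pattern already inside sl.take j
          have hM2 : (M' ++ [i]).Sublist (List.range (i+1)) := by
            rw [List.range_succ]; exact hM
          have h1 := ihj (by omega) (M' ++ [i]) hM2 (by
            rw [List.map_append]; simpa using hw)
          have h2 := cost_mono_j sl (i+1) j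
          have hv : valM (M' ++ [i]) (i+1) (j+1) = valM (M' ++ [i]) (i+1) j + 1 := by
            simp [valM]
            ring
          omega
        · -- last kept char matches s[j]
          obtain ⟨hx1, hx2⟩ := List.append_inj' hx rfl
          have hchar : pvTgt.getD i ' ' = sl.getD j ' ' := by
            simpa using hx2
          have hc : (pvTgt.getD i ' ' == sl.getD j ' ') = true := beq_iff_eq.mpr hchar
          rw [cost_succ_succ, if_pos hc]
          have h2 := ihi j (by omega) M' hM' (by rw [← hx1] at hX; exact hX)
          have hv : valM (M' ++ [i]) (i+1) (j+1) = valM M' i j := by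
            simp [valM, Ti, sumw]
            ring
          omega

-- lower bound: some feasible kept set achieves cost
theorem exists_valM (sl : List Char) : ∀ i : Nat, ∀ j, j ≤ sl.length →
    ∃ M : List Nat, M.Sublist (List.range i) ∧
      (M.map (fun k => pvTgt.getD k ' ')).Sublist (sl.take j) ∧
      cost sl i j = valM M i j := by
  intro i
  induction i with
  | zero =>
    intro j _
    exact ⟨[], List.nil_sublist _, by simp, by rw [cost_zero]; simp [valM, sumw, Ti]⟩
  | succ i ihi =>
    intro j
    induction j with
    | zero =>
      intro _
      exact ⟨[], List.nil_sublist _, by simp, by rw [cost_col0]; simp [valM, sumw]⟩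
    | succ j ihj =>
      intro hj
      have hjl : j < sl.length := by omega
      by_cases hc : (pvTgt.getD i ' ' == sl.getD j ' ') = true
      · obtain ⟨M, hM, hsub, heq⟩ := ihi j (by omega)
        refine ⟨M ++ [i], ?_, ?_, ?_⟩
        · rw [List.range_succ]; exact List.Sublist.append hM (List.Sublist.refl _)
        · rw [List.map_append, take_succ_of_lt sl j hjl]
          refine List.Sublist.append hsub ?_
          have he := eq_of_beq hc
          simp only [List.map_cons, List.map_nil, he]
          exact List.Sublist.refl _
        · rw [cost_succ_succ, if_pos hc, heq]
          simp [valM, Ti, sumw]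
          ring
      · rcases le_total (cost sl (i+1) j + 1) (cost sl i (j+1) + ((i : Int) + 1)) with hle | hle
        · obtain ⟨M, hM, hsub, heq⟩ := ihj (by omega)
          refine ⟨M, hM, ?_, ?_⟩
          · refine hsub.trans ?_
            rw [take_succ_of_lt sl j hjl]
            exact List.sublist_append_left _ _
          · rw [cost_succ_succ, if_neg hc, min_eq_left hle, heq]
            simp [valM]
            ring
        · obtain ⟨M, hM, hsub, heq⟩ := ihi (j+1) hj
          refine ⟨M, hM.trans (by rw [List.range_succ]; exact List.sublist_append_left _ _), hsub, ?_⟩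
          rw [cost_succ_succ, if_neg hc, min_eq_right hle, heq]
          simp [valM, Ti]
          ring

-- greedy scan correctness
theorem greedy_aux (pat : List Char) : ∀ (sl : List Char) (k : Nat), k ≤ pat.length →
    ((sl.foldl (fun k ch => if k < pat.length ∧ pat.getD k ' ' == ch then k + 1 else k) k)
        = pat.length
      ↔ (pat.drop k).Sublist sl) := by
  intro sl
  induction sl with
  | nil =>
    intro k hk
    rw [List.foldl_nil, List.sublist_nil, List.drop_eq_nil_iff]
    omega
  | cons ch sl ih =>
    intro k hk
    rw [List.foldl_cons]
    by_cases h1 : k < pat.length ∧ (pat.getD k ' ' == ch) = true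
    · rw [if_pos h1]
      obtain ⟨hlt, hbeq⟩ := h1
      have hg : pat.getD k ' ' = pat[k] := getD_eq_getElem_of_lt pat k hlt
      have hch : pat[k] = ch := by rw [← hg]; exact eq_of_beq hbeq
      rw [ih (k+1) (by omega), List.drop_eq_getElem_cons hlt, hch, List.cons_sublist_cons]
    · rw [if_neg h1, ih k hk]
      by_cases hk2 : k = pat.length
      · subst hk2; simp [List.drop_length]
      · have hlt : k < pat.length := by omega
        have hne : ¬ ((pat.getD k ' ' == ch) = true) := fun hb => h1 ⟨hlt, hb⟩
        have hg : pat.getD k ' ' = pat[k] := getD_eq_getElem_of_lt pat k hlt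
        rw [List.drop_eq_getElem_cons hlt]
        constructor
        · exact fun h => h.cons _
        · intro h
          rcases List.sublist_cons_iff.mp h with h' | ⟨r, hr, _⟩
          · exact h'
          · exfalso
            have hpc : pat[k] = ch := by injection hr
            exact hne (by rw [hg, hpc]; simp)

theorem greedy_iff (pat sl : List Char) :
    (pvGreedyK pat sl == pat.length) = true ↔ pat.Sublist sl := by
  unfold pvGreedyK
  rw [beq_iff_eq]
  have h := greedy_aux pat sl 0 (by omega)
  rwa [List.drop_zero] at h

-- every sublist of range 7 is hit by a mask
set_option maxRecDepth 40000 in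
theorem mask_complete : ∀ M ∈ (List.range 7).sublists,
    M = [] ∨ ∃ mask ∈ List.range' 1 127, pvIdx mask = M := by
  decide

-- B's loop body and fold characterisation
def bstep (sl : List Char) (best : Int) (mask : Nat) : Int :=
  let idx := pvIdx mask
  let pat := idx.map (fun i => pvTgt.getD i ' ')
  if pvGreedyK pat sl == pat.length then
    let skip : Int := 28 - (idx.map (fun i => (i : Int) + 1)).sum
    let cand := skip + (sl.length : Int) - pat.length
    if cand < best then cand else best
  else best

theorem alt_unfold (s : String) :
    get_min_swap_times_alt s
      = (List.range' 1 127).foldl (bstep s.toList) ((s.toList.length : Int) + 28) := rfl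

def bval (sl : List Char) (mask : Nat) : Int := valM (pvIdx mask) 7 sl.length

def bok (sl : List Char) (mask : Nat) : Bool :=
  pvGreedyK ((pvIdx mask).map (fun i => pvTgt.getD i ' ')) sl
    == ((pvIdx mask).map (fun i => pvTgt.getD i ' ')).length

theorem Ti7 : Ti 7 = 28 := by norm_num [Ti]

theorem bstep_eq (sl : List Char) (best : Int) (mask : Nat) :
    bstep sl best mask =
      if bok sl mask then (if bval sl mask < best then bval sl mask else best) else best := by
  have hv : (28 : Int) - ((pvIdx mask).map (fun i => (i : Int) + 1)).sum + (sl.length : Int)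
      - (((pvIdx mask).map (fun i => pvTgt.getD i ' ')).length : Int) = bval sl mask := by
    simp [bval, valM, sumw, Ti7]
  simp only [bstep, bok]
  rw [hv]
  rfl

theorem fold_le_init (sl : List Char) : ∀ (L : List Nat) (best : Int),
    (L.foldl (bstep sl) best) ≤ best := by
  intro L
  induction L with
  | nil => intro best; simp
  | cons m L ih =>
    intro best
    rw [List.foldl_cons]
    refine le_trans (ih _) ?_
    rw [bstep_eq]
    split_ifs <;> omega

theorem fold_le_elem (sl : List Char) : ∀ (L : List Nat) (best : Int) (m : Nat), m ∈ L →
    bok sl m = true → (L.foldl (bstep sl) best) ≤ bval sl m := by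
  intro L
  induction L with
  | nil => intro best m hm; exact absurd hm (List.not_mem_nil)
  | cons a L ih =>
    intro best m hm hok
    rw [List.foldl_cons]
    rcases List.mem_cons.mp hm with rfl | hm'
    · refine le_trans (fold_le_init sl L _) ?_
      rw [bstep_eq, if_pos hok]
      split_ifs <;> omega
    · exact ih _ m hm' hok

theorem le_fold (sl : List Char) : ∀ (L : List Nat) (best x : Int), x ≤ best →
    (∀ m ∈ L, bok sl m = true → x ≤ bval sl m) →
    x ≤ L.foldl (bstep sl) best := by
  intro L
  induction L with
  | nil => intro best x h _; simpa
  | cons a L ih =>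
    intro best x hxb hall
    rw [List.foldl_cons]
    refine ih _ x ?_ (fun m hm => hall m (List.mem_cons_of_mem _ hm))
    rw [bstep_eq]
    split_ifs with h1 h2
    · exact hall a List.mem_cons_self h1
    · exact hxb
    · exact hxb

-- ===== VERDICT (by name: the statement is the Claim_ definition above) =====
theorem get_min_swap_times_spec : Claim_equal_get_min_swap_times := by
  intro s _
  unfold Spec_get_min_swap_times
  rw [a_eq_cost, alt_unfold]
  set sl := s.toList with hsl
  apply le_antisymm
  · apply le_fold
    · have h := cost_le_valM sl 7 sl.length (le_refl _) [] (List.nil_sublist _) (by simp)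
      simp [valM, sumw, Ti7] at h
      omega
    · intro m _ hok
      have hsub : ((pvIdx m).map (fun i => pvTgt.getD i ' ')).Sublist sl :=
        (greedy_iff _ _).mp hok
      have h := cost_le_valM sl 7 sl.length (le_refl _) (pvIdx m)
        List.filter_sublist (by rw [List.take_length]; exact hsub)
      simpa [bval] using h
  · obtain ⟨M, hM, hsub, heq⟩ := exists_valM sl 7 sl.length (le_refl _)
    rw [List.take_length] at hsub
    rcases mask_complete M (List.mem_sublists.mpr hM) with rfl | ⟨mask, hmem, hmask⟩
    · rw [heq]
      have h2 := fold_le_init sl (List.range' 1 127) ((sl.length : Int) + 28)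
      have hv : valM [] 7 sl.length = (sl.length : Int) + 28 := by
        simp [valM, sumw, Ti7]; ring
      omega
    · rw [heq, ← hmask]
      exact fold_le_elem sl _ _ mask hmem
        (by rw [bok]; exact (greedy_iff _ _).mpr (by rw [hmask]; exact hsub))
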